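-- pv_equiv track=rewrite | github.com/Liza129/liza-s-repository | project_python.py | country_density_points_F
-- ===== SOURCE A (Python) =====
-- def country_density_points_F(obj, density_of_each_c_obj):
--     obj_firebase_density_countries = {}
--
--     #layout of the dictionary
--     #Example
--     #density_of_each_c_obj[India] = ["density in year1","density in year2","density in year3","density in year4","density in year5]
--
--     #Add each country as a key
--     for i in obj["country"]:
--         obj_firebase_density_countries[i] = []
--     #Go through each value to map it into new dictionary
--     for key, value in density_of_each_c_obj.items():
--         c = 0 #Update counter fow each new interation of value
--         for i in obj_firebase_density_countries:
--             obj_firebase_density_countries[i].append(value[c]) #Append density into its corresponding key - country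
--             c += 1
--
--     return obj_firebase_density_countries
-- ===== SOURCE B (Python) =====
-- def country_density_points_F(obj, density_of_each_c_obj):
--     countries = []
--     for c in obj["country"]:
--         if c not in countries:
--             countries.append(c)
--
--     def peel(cs, cols):
--         # recursion that consumes one country and the head of every column per step
--         if not cs:
--             return {}
--         out = {cs[0]: [col[0] for col in cols]}
--         out.update(peel(cs[1:], [col[1:] for col in cols]))
--         return out
--
--     return peel(countries, list(density_of_each_c_obj.values()))
-- ===== Notes on version B (the rewrite author's own statement) =====
-- stated objective: alternative
-- what changed: Replaces A's dict-mutation scheme (initialise every country key, then an outer loop over density entries appending value[c] via a manual counter) with a structural recursion that at each step emits one country paired with the heads of all value-columns and recurses on the remaining countries and the columns' tails, using no counters or integer indexing.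
import Mathlib
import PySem

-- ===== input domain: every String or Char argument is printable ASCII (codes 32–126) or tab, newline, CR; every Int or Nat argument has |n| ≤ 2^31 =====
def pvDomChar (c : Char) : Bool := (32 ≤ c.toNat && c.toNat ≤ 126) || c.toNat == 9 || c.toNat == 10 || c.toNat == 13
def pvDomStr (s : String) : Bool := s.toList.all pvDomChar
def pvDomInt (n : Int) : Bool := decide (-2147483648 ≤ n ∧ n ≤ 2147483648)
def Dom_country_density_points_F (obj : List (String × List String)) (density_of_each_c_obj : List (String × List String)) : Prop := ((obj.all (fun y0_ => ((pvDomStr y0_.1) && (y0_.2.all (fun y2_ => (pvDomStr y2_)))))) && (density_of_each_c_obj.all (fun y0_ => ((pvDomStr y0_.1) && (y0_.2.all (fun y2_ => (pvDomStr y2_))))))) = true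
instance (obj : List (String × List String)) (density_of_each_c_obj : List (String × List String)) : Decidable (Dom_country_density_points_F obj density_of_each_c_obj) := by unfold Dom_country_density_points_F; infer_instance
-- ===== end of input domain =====

-- B replaces A's dict-mutation scheme (initialise every country key, then an outer loop over density
-- entries appending value[c] via a manual counter) with a structural recursion: each step emits one
-- country paired with the heads of all value-columns and recurses on the remaining countries and the
-- columns' tails — no counters, no integer indexing (objective: alternative).

-- ===== PORT A =====
-- the inner 'for i in obj_firebase_density_countries: … append(value[c]); c += 1' loop of A
def pvInnerA (value : List String) (d : PySem.Dict String (List String)) :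
    PySem.Dict String (List String) :=
  (d.keys.foldl
    (fun (p : PySem.Dict String (List String) × Int) i =>
      (p.1.modify i [] (fun old => old ++ [PySem.List.pyGetD value p.2 ""]), p.2 + 1))
    (d, (0 : Int))).1

def country_density_points_F (obj : List (String × List String)) (density_of_each_c_obj : List (String × List String)) : List (String × List String) :=
  match (PySem.Dict.ofList obj).get? "country" with
  | none => []  -- obj["country"] raises KeyError in Python; excluded by Pre_
  | some countryList =>
    -- first loop: add each country as a key with value []
    let d0 : PySem.Dict String (List String) :=
      countryList.foldl (fun d i => d.insert i ([] : List String)) PySem.Dict.empty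
    -- second loop over density_of_each_c_obj.items(), inner loop pvInnerA
    let fin : PySem.Dict String (List String) :=
      (PySem.Dict.ofList density_of_each_c_obj).items.foldl
        (fun d kv => pvInnerA kv.2 d) d0
    fin.items

-- ===== PORT B =====
-- B's dedup loop: 'countries = []; for c in obj["country"]: if c not in countries: countries.append(c)'
def pvDedupLoop (cs : List String) : List String :=
  cs.foldl (fun acc c => if acc.contains c then acc else acc ++ [c]) []

-- B's 'peel' recursion; '{cs[0]: row}' then 'out.update(rest)' is a cons since the countries passed
-- in are distinct (rest never carries cs[0]); 'col[0]' total via pyGetD (Pre_ keeps it in range),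
-- 'col[1:]' is PySem.List.slice.
def pvPeel : List String → List (List String) → List (String × List String)
  | [], _ => []
  | c :: cs, cols =>
      (c, cols.map (fun col => PySem.List.pyGetD col 0 "")) ::
        pvPeel cs (cols.map (fun col => PySem.List.slice col (some 1) none))

def country_density_points_F_alt (obj : List (String × List String)) (density_of_each_c_obj : List (String × List String)) : List (String × List String) :=
  match (PySem.Dict.ofList obj).get? "country" with
  | none => []  -- obj["country"] raises KeyError in Python; excluded by Pre_
  | some countryList =>
    pvPeel (pvDedupLoop countryList) (PySem.Dict.ofList density_of_each_c_obj).values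

-- ===== PRECONDITION & SPEC =====
-- Pre_ excludes exactly the Python crashes: a KeyError when obj has no "country" key, and an
-- IndexError when some density value-list is shorter than the number of distinct countries.
def Pre_country_density_points_F (obj : List (String × List String)) (density_of_each_c_obj : List (String × List String)) : Prop :=
  (PySem.Dict.ofList obj).contains "country" = true ∧
  ∀ kv ∈ (PySem.Dict.ofList density_of_each_c_obj).items,
    (PySem.List.dedup ((PySem.Dict.ofList obj).getD "country" [])).length ≤ kv.2.length
instance (obj : List (String × List String)) (density_of_each_c_obj : List (String × List String)) : Decidable (Pre_country_density_points_F obj density_of_each_c_obj) := by unfold Pre_country_density_points_F; infer_instance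

def pvWitness_country_density_points_F : (List (String × List String)) × (List (String × List String)) :=
  ([("country", ["India", "Chile"])], [("y1", ["12", "7"]), ("y2", ["13", "8"])])

def Spec_country_density_points_F (obj : List (String × List String)) (density_of_each_c_obj : List (String × List String)) (out : List (String × List String)) : Prop := out = country_density_points_F_alt obj density_of_each_c_obj
instance (obj : List (String × List String)) (density_of_each_c_obj : List (String × List String)) (out : List (String × List String)) : Decidable (Spec_country_density_points_F obj density_of_each_c_obj out) := by unfold Spec_country_density_points_F; infer_instance

-- ===== CLAIM (what is proved, stated in full; the proofs are below) =====
def Claim_equal_country_density_points_F : Prop := ∀ (obj : List (String × List String)) (density_of_each_c_obj : List (String × List String)), Dom_country_density_points_F obj density_of_each_c_obj → Pre_country_density_points_F obj density_of_each_c_obj → Spec_country_density_points_F obj density_of_each_c_obj (country_density_points_F obj density_of_each_c_obj)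

-- ===== LEMMAS AND PROOFS =====

-- A's counter-driven inner loop is a fold over the enumerated key list
theorem pvInnerA_eq_enum_foldl (w : List String) (ks : List String) (c0 : Int)
    (d : PySem.Dict String (List String)) :
    (ks.foldl
      (fun (p : PySem.Dict String (List String) × Int) i =>
        (p.1.modify i [] (fun old => old ++ [PySem.List.pyGetD w p.2 ""]), p.2 + 1))
      (d, c0)).1
    = ((PySem.List.enumerate ks c0).map
        (fun jc => (jc.2, PySem.List.pyGetD w jc.1 ""))).foldl
        (fun d p => d.modify p.1 [] (fun old => old ++ [p.2])) d := by
  induction ks generalizing c0 d with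
  | nil => simp [PySem.List.enumerate_nil]
  | cons k ks ih => simp [PySem.List.enumerate_cons, ih]

theorem pv_filter_enum_eq_nil (ks : List String) (f : Int → String) (c0 : Int) (c : String)
    (hc : c ∉ ks) :
    ((PySem.List.enumerate ks c0).map (fun jc => (jc.2, f jc.1))).filter
      (fun p => p.1 == c) = [] := by
  rw [List.filter_eq_nil_iff]
  intro p hp
  simp only [List.mem_map] at hp
  obtain ⟨jc, hjc, rfl⟩ := hp
  rw [PySem.List.mem_enumerate_iff] at hjc
  obtain ⟨k, hk, rfl⟩ := hjc
  simp only [beq_iff_eq]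
  intro h; exact hc (h ▸ List.getElem_mem hk)

theorem pv_filter_enum (ks : List String) (hnd : ks.Nodup) (f : Int → String) (c0 : Int)
    (j : Nat) (hj : j < ks.length) :
    (((PySem.List.enumerate ks c0).map (fun jc => (jc.2, f jc.1))).filter
      (fun p => p.1 == ks[j])).map (·.2) = [f (c0 + j)] := by
  induction ks generalizing c0 j with
  | nil => simp at hj
  | cons k ks ih =>
    rw [PySem.List.enumerate_cons]
    rcases List.nodup_cons.mp hnd with ⟨hk, hnd'⟩
    cases j with
    | zero =>
      simp only [List.getElem_cons_zero, List.map_cons, List.filter_cons]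
      simp only [beq_self_eq_true, if_pos]
      rw [pv_filter_enum_eq_nil ks f (c0 + 1) k hk]
      simp
    | succ j =>
      have hj' : j < ks.length := by simpa using hj
      have hkne : k ≠ ks[j] := fun h => hk (h ▸ List.getElem_mem hj')
      simp only [List.getElem_cons_succ, List.map_cons, List.filter_cons]
      rw [if_neg (by simpa using hkne)]
      rw [ih hnd' (c0 + 1) j hj']
      congr 2
      omega

-- one full inner pass: keys are unchanged, each key's list gains value[j]
theorem pvInnerA_keys (w : List String) (d : PySem.Dict String (List String)) :
    (pvInnerA w d).keys = d.keys := by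
  unfold pvInnerA
  rw [pvInnerA_eq_enum_foldl]
  rw [PySem.Dict.keys_foldl_modify_key
        (key := fun (p : String × String) => p.1)
        (f := fun _ p => (fun old => old ++ [p.2]))]
  rw [List.map_map]
  have : ((fun (p : String × String) => p.1) ∘
      (fun jc : Int × String => (jc.2, PySem.List.pyGetD w jc.1 ""))) =
      (fun jc : Int × String => jc.2) := rfl
  rw [this, PySem.List.map_snd_enumerate]
  rw [PySem.Set.update_eq_append_filter]
  have : (PySem.Set.ofList d.keys).filter
      (fun y => !(PySem.Set.contains d.keys y)) = [] := by
    rw [List.filter_eq_nil_iff]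
    intro y hy
    have : y ∈ d.keys := by
      have := (PySem.Set.mem_ofList (xs := d.keys) (y := y)).mp hy
      exact this
    simp [this]
  rw [this, List.append_nil]

theorem pvInnerA_getD (w : List String) (d : PySem.Dict String (List String))
    (hnd : d.keys.Nodup) (j : Nat) (hj : j < d.keys.length) :
    (pvInnerA w d).getD d.keys[j] [] =
      d.getD d.keys[j] [] ++ [PySem.List.pyGetD w j ""] := by
  unfold pvInnerA
  rw [pvInnerA_eq_enum_foldl]
  rw [PySem.Dict.getD_foldl_modify_append]
  congr 1
  rw [pv_filter_enum d.keys hnd (fun i => PySem.List.pyGetD w i "") 0 j hj]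
  simp

-- the outer loop over the density values
theorem pv_outer (ws : List (List String)) (cnt : List String) (hnd : cnt.Nodup)
    (d : PySem.Dict String (List String)) (hk : d.keys = cnt)
    (g : Nat → List String)
    (hg : ∀ (j : Nat) (hj : j < cnt.length), d.getD (cnt[j]'hj) [] = g j) :
    (ws.foldl (fun d w => pvInnerA w d) d).keys = cnt ∧
    ∀ (j : Nat) (hj : j < cnt.length),
      (ws.foldl (fun d w => pvInnerA w d) d).getD (cnt[j]'hj) [] =
        g j ++ ws.map (fun v => PySem.List.pyGetD v (j : Int) "") := by
  induction ws generalizing d g with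
  | nil => exact ⟨hk, by simpa using hg⟩
  | cons w ws ih =>
    simp only [List.foldl_cons]
    have hnd' : d.keys.Nodup := hk ▸ hnd
    have hk' : (pvInnerA w d).keys = cnt := by rw [pvInnerA_keys w d, hk]
    have hg' : ∀ (j : Nat) (hjl : j < cnt.length),
        (pvInnerA w d).getD (cnt[j]'hjl) [] = g j ++ [PySem.List.pyGetD w (j : Int) ""] := by
      intro j hjl
      have hj2 : j < d.keys.length := by rw [hk]; exact hjl
      have := pvInnerA_getD w d hnd' j hj2
      have he : d.keys[j] = cnt[j]'hjl := by simp [hk]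
      rw [he] at this
      rw [this, hg j hjl]
    obtain ⟨h1, h2⟩ := ih (pvInnerA w d) hk'
      (fun j => g j ++ [PySem.List.pyGetD w (j : Int) ""]) hg'
    refine ⟨h1, fun j hjl => ?_⟩
    rw [h2 j hjl]
    simp

theorem pv_d0_getD (cs : List String) (d : PySem.Dict String (List String))
    (hd : ∀ k, d.getD k [] = []) (k : String) :
    (cs.foldl (fun d i => d.insert i ([] : List String)) d).getD k [] = [] := by
  induction cs generalizing d with
  | nil => exact hd k
  | cons c cs ih =>
    simp only [List.foldl_cons]
    exact ih _ (fun k' => by rw [PySem.Dict.getD_insert]; split <;> simp [hd])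

theorem pv_foldl_snd (l : List (String × List String)) (d : PySem.Dict String (List String)) :
    l.foldl (fun d kv => pvInnerA kv.2 d) d = (l.map (fun kv => kv.2)).foldl (fun d w => pvInnerA w d) d := by
  induction l generalizing d with
  | nil => rfl
  | cons kv l ih => simp only [List.foldl_cons, List.map_cons]; exact ih _

-- B's dedup loop builds exactly set-in-order of the country list
theorem pvDedupLoop_eq (cs : List String) : pvDedupLoop cs = PySem.Set.ofList cs := by
  rw [PySem.Set.ofList_eq_foldl]; rfl

theorem pvPeel_length (cs : List String) (cols : List (List String)) :
    (pvPeel cs cols).length = cs.length := by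
  induction cs generalizing cols with
  | nil => rfl
  | cons c cs ih => simp [pvPeel, ih]

-- row j of the peel recursion is position j of every column
theorem pvPeel_getElem (cs : List String) (cols : List (List String))
    (j : Nat) (hj : j < cs.length) :
    (pvPeel cs cols)[j]'(by rw [pvPeel_length]; exact hj) =
      (cs[j], cols.map (fun v => PySem.List.pyGetD v (j : Int) "")) := by
  induction cs generalizing cols j with
  | nil => simp at hj
  | cons c cs ih =>
    cases j with
    | zero => simp [pvPeel]
    | succ j =>
      have hj' : j < cs.length := by simpa using hj
      have := ih (cols.map (fun col => PySem.List.slice col (some 1) none)) j hj'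
      simp only [pvPeel, List.getElem_cons_succ, this, List.map_map, List.getElem_cons_succ]
      refine Prod.ext rfl ?_
      apply List.map_congr_left
      intro col _
      simp only [Function.comp, PySem.List.slice_from_one]
      rw [PySem.List.pyGetD_natCast, PySem.List.pyGetD_natCast]
      simp [List.getD, List.getElem?_tail]

-- ===== VERDICT (by name: the statement is the Claim_ definition above) =====
theorem country_density_points_F_spec : Claim_equal_country_density_points_F := by
  intro obj density _ _
  unfold Spec_country_density_points_F country_density_points_F country_density_points_F_alt
  cases hc : (PySem.Dict.ofList obj).get? "country" with
  | none => rfl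
  | some cs =>
    simp only []
    rw [pvDedupLoop_eq]
    set cnt := PySem.Set.ofList cs with hcnt
    have hnd : cnt.Nodup := PySem.Set.nodup_ofList cs
    set d0 : PySem.Dict String (List String) :=
      cs.foldl (fun d i => d.insert i ([] : List String)) PySem.Dict.empty with hd0
    have hk0 : d0.keys = cnt := by
      rw [hd0, PySem.Dict.keys_foldl_insert (f := fun _ _ => ([] : List String))]
      rw [PySem.Dict.keys_empty, PySem.Set.update_nil_left]
    have hg0 : ∀ (j : Nat) (hj : j < cnt.length), d0.getD (cnt[j]'hj) [] = (fun _ => ([] : List String)) j := by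
      intro j _
      exact pv_d0_getD cs PySem.Dict.empty (fun k => PySem.Dict.getD_empty k []) _
    set ws : List (List String) := (PySem.Dict.ofList density).values with hws
    have hfold : (PySem.Dict.ofList density).items.foldl (fun d kv => pvInnerA kv.2 d) d0
        = ws.foldl (fun d w => pvInnerA w d) d0 := by
      rw [hws, PySem.Dict.values]
      exact pv_foldl_snd _ _
    obtain ⟨hkf, hgf⟩ := pv_outer ws cnt hnd d0 hk0 (fun _ => []) hg0
    rw [hfold]
    set fin := ws.foldl (fun d w => pvInnerA w d) d0 with hfin
    rw [PySem.Dict.items_eq_map_keys fin (hkf ▸ hnd) []]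
    rw [hkf]
    apply List.ext_getElem
    · simp [pvPeel_length]
    · intro j hj1 hj2
      have hjl : j < cnt.length := by simpa using hj1
      rw [pvPeel_getElem cnt ws j hjl]
      simp only [List.getElem_map]
      rw [hgf j hjl]
      simp
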